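-- pv_equiv track=rewrite | github.com/EmielThomaes/5WWIPython | 12b_Roosters/Kleurendriehoek.py | kleuren
-- ===== SOURCE A (Python) =====
-- def kleuren(lijst):
--     green, red, yellow = 0, 0, 0
--     for i in range(len(lijst)):
--         for j in range(len(lijst[i])):
--             if lijst[i][j] == 'Y':
--                 yellow += 1
--             elif lijst[i][j] == 'G':
--                 green += 1
--             else:
--                 red += 1
--     return green, red, yellow
-- ===== SOURCE B (Python) =====
-- def kleuren(lijst):
--     flat = [cel for rij in lijst for cel in rij]
--     green = flat.count('G')
--     yellow = flat.count('Y')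
--     return green, len(flat) - green - yellow, yellow
-- ===== Notes on version B (the rewrite author's own statement) =====
-- stated objective: idiomatic
-- what changed: B flattens the grid once and uses staged list.count passes for 'G' and 'Y', then derives red arithmetically as len - green - yellow, instead of A's single nested loop with a three-way branch and three running counters.
import Mathlib
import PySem

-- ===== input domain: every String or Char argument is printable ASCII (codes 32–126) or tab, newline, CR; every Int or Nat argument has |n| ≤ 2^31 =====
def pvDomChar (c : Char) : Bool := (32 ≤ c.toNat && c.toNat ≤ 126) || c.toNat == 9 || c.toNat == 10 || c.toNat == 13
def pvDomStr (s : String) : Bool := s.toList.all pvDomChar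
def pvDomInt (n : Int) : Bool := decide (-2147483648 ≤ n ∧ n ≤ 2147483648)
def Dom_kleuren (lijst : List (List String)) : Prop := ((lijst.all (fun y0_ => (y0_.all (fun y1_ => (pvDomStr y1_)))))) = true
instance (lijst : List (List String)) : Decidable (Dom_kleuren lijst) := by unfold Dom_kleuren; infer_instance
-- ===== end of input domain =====

-- B flattens the grid once, counts 'G' and 'Y' with staged list.count passes and
-- derives red = len - green - yellow, replacing A's nested branching loop (objective: idiomatic).

-- ===== PORT A =====
-- state (green, red, yellow), one step per cell, branches in A's order
def kleurenStepA (s : Int × Int × Int) (c : String) : Int × Int × Int :=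
  if c = "Y" then (s.1, s.2.1, s.2.2 + 1)
  else if c = "G" then (s.1 + 1, s.2.1, s.2.2)
  else (s.1, s.2.1 + 1, s.2.2)

def kleuren (lijst : List (List String)) : Int × Int × Int :=
  lijst.foldl (fun s rij => rij.foldl kleurenStepA s) ((0 : Int), (0 : Int), (0 : Int))

-- ===== PORT B =====
def kleuren_alt (lijst : List (List String)) : Int × Int × Int :=
  let flat := lijst.flatMap (fun rij => rij)          -- [cel for rij in lijst for cel in rij]
  let green : Int := (PySem.List.count flat "G" : Int)
  let yellow : Int := (PySem.List.count flat "Y" : Int)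
  (green, (flat.length : Int) - green - yellow, yellow)

-- ===== PRECONDITION & SPEC =====
def Spec_kleuren (lijst : List (List String)) (out : Int × Int × Int) : Prop := out = kleuren_alt lijst
instance (lijst : List (List String)) (out : Int × Int × Int) : Decidable (Spec_kleuren lijst out) := by unfold Spec_kleuren; infer_instance

-- ===== CLAIM =====
def Claim_equal_kleuren : Prop := ∀ (lijst : List (List String)), Dom_kleuren lijst → Spec_kleuren lijst (kleuren lijst)

-- ===== LEMMAS AND PROOFS =====
-- A's fold over a flat list from (g, r, y) adds (count G, len - count G - count Y, count Y)
lemma foldA_flat (flat : List String) (g r y : Int) :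
    flat.foldl kleurenStepA (g, r, y) =
      (g + (flat.count "G" : Int),
       r + (flat.length : Int) - (flat.count "G" : Int) - (flat.count "Y" : Int),
       y + (flat.count "Y" : Int)) := by
  induction flat generalizing g r y with
  | nil => simp
  | cons c cs ih =>
      simp only [List.foldl, kleurenStepA]
      split_ifs with h1 h2
      · rw [ih]
        subst h1
        simp only [List.count_cons, List.length_cons, Prod.mk.injEq, beq_iff_eq]
        norm_num
        refine ⟨?_, ?_⟩ <;> ring
      · rw [ih]
        subst h2
        simp only [List.count_cons, List.length_cons, Prod.mk.injEq, beq_iff_eq, h1]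
        norm_num [Ne.symm]
        refine ⟨?_, ?_⟩ <;> ring
      · rw [ih]
        simp only [List.count_cons, List.length_cons, Prod.mk.injEq, beq_iff_eq, h1, h2]
        norm_num
        ring

-- ===== VERDICT =====
theorem kleuren_spec : Claim_equal_kleuren := by
  intro lijst _
  unfold Spec_kleuren kleuren kleuren_alt
  rw [show (lijst.flatMap fun rij => rij) = lijst.flatten by simp [List.flatMap_def],
      ← List.foldl_flatten, foldA_flat]
  simp [PySem.List.count_eq]
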